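-- pv_equiv track=rewrite | github.com/qianfengXY/Shipyard | src/shipyard/main.py | _last_task_id_from_events
-- ===== SOURCE A (Python) =====
-- def _last_task_id_from_events(events: list[str]) -> str | None:
--     for event in reversed(events):
--         if "task_id=" not in event:
--             continue
--         task_id = event.split("task_id=", 1)[1].strip()
--         if task_id and task_id != "None":
--             return task_id
--     return None
-- ===== SOURCE B (Python) =====
-- def _last_task_id_from_events(events: list[str]) -> str | None:
--     result = None
--     for event in events:
--         if "task_id=" in event:
--             task_id = event.split("task_id=", 1)[1].strip()
--             if task_id and task_id != "None":
--                 result = task_id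
--     return result
-- ===== Notes on version B (the rewrite author's own statement) =====
-- stated objective: alternative
-- what changed: Replaced the reversed() scan with early return by a single forward pass keeping a 'last valid task_id seen' accumulator.
import Mathlib
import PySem

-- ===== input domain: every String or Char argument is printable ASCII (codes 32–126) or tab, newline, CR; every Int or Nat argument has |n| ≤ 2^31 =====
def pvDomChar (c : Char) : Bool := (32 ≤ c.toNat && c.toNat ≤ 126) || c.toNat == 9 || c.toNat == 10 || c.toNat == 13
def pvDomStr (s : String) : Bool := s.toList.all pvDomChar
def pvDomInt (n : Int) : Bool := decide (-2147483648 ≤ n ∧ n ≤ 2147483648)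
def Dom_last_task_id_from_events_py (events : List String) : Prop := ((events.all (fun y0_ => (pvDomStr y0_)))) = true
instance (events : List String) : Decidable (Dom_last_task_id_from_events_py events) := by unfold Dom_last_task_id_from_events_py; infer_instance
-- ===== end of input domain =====

-- B replaces A's reversed scan with early return by a forward pass keeping a 'last valid seen' accumulator (alternative decomposition, same cost).

-- ===== PORT A =====
-- the body of A's loop parse: event.split("task_id=", 1)[1].strip()
def pvParse (event : String) : String :=
  PySem.Str.strip ((PySem.List.pyGet? ((PySem.Str.splitMax? event "task_id=" 1).getD []) 1).getD "")

-- A's loop over reversed(events): first event (from the back) whose task_id is truthy and ≠ "None"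
def pvLoopA : List String → Option String
  | [] => none
  | event :: rest =>
    if PySem.Str.isIn "task_id=" event = false then pvLoopA rest
    else
      let task_id := pvParse event
      if task_id ≠ "" ∧ task_id ≠ "None" then some task_id else pvLoopA rest

def last_task_id_from_events_py (events : List String) : Option String :=
  pvLoopA events.reverse

-- ===== PORT B =====
def last_task_id_from_events_py_alt (events : List String) : Option String :=
  events.foldl
    (fun result event =>
      if PySem.Str.isIn "task_id=" event then
        let task_id := pvParse event
        if task_id ≠ "" ∧ task_id ≠ "None" then some task_id else result
      else result)
    none

-- ===== PRECONDITION & SPEC =====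
def Spec_last_task_id_from_events_py (events : List String) (out : Option String) : Prop := out = last_task_id_from_events_py_alt events
instance (events : List String) (out : Option String) : Decidable (Spec_last_task_id_from_events_py events out) := by unfold Spec_last_task_id_from_events_py; infer_instance

-- ===== CLAIM (what is proved, stated in full; the proofs are below) =====
def Claim_equal_last_task_id_from_events_py : Prop := ∀ (events : List String), Dom_last_task_id_from_events_py events → Spec_last_task_id_from_events_py events (last_task_id_from_events_py events)

-- ===== LEMMAS AND PROOFS =====

-- A's scan distributes over append: first hit in xs, else first hit in ys
theorem pvLoopA_append (xs ys : List String) :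
    pvLoopA (xs ++ ys) = (pvLoopA xs).or (pvLoopA ys) := by
  induction xs with
  | nil => simp [pvLoopA]
  | cons e rest ih =>
    simp only [List.cons_append, pvLoopA]
    by_cases h : PySem.Str.isIn "task_id=" e = false
    · rw [if_pos h, if_pos h, ih]
    · rw [if_neg h, if_neg h]
      by_cases hv : pvParse e ≠ "" ∧ pvParse e ≠ "None"
      · simp [hv]
      · simp [hv, ih]

-- B's fold from any accumulator equals A's backward scan, falling back to the accumulator
theorem pvFold_eq (l : List String) : ∀ (acc : Option String),
    l.foldl
      (fun result event =>
        if PySem.Str.isIn "task_id=" event then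
          let task_id := pvParse event
          if task_id ≠ "" ∧ task_id ≠ "None" then some task_id else result
        else result)
      acc = (pvLoopA l.reverse).or acc := by
  induction l with
  | nil => intro acc; simp [pvLoopA]
  | cons e rest ih =>
    intro acc
    simp only [List.foldl_cons, ih, List.reverse_cons, pvLoopA_append, Option.or_assoc]
    congr 1
    by_cases h : PySem.Chars.isIn ['t', 'a', 's', 'k', '_', 'i', 'd', '='] e.toList = false
    · simp [pvLoopA, PySem.Str.isIn, h]
    · simp only [Bool.not_eq_false] at h
      by_cases hv : pvParse e ≠ "" ∧ pvParse e ≠ "None"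
      · simp [pvLoopA, PySem.Str.isIn, h, hv]
      · simp [pvLoopA, PySem.Str.isIn, h, hv]

-- ===== VERDICT (by name: the statement is the Claim_ definition above) =====
theorem last_task_id_from_events_py_spec : Claim_equal_last_task_id_from_events_py := by
  intro events _
  unfold Spec_last_task_id_from_events_py last_task_id_from_events_py last_task_id_from_events_py_alt
  rw [pvFold_eq]
  simp
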